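-- pv_equiv track=rewrite | github.com/kwj/project-euler | python/euler/bin/p0024.py | make_fact_tbl
-- ===== SOURCE A (Python) =====
-- from math import factorial
--
-- def make_fact_tbl(num, depth):
--     result = []
--     i = num - 1
--     divisor = factorial(num - depth)
--     for _ in range(depth):
--         result.append(factorial(i) // divisor)
--         i -= 1
--
--     return result
-- ===== SOURCE B (Python) =====
-- def make_fact_tbl(num, depth):
--     # Build the table back-to-front: the last entry is 1 and each earlier
--     # entry is the next one times the next larger integer (one multiply per
--     # step instead of computing two factorials and a big division per entry).
--     out = []
--     acc = 1
--     j = num - depth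
--     for _ in range(depth):
--         out.append(acc)
--         j += 1
--         acc *= j
--     out.reverse()
--     return out
-- ===== Notes on version B (the rewrite author's own statement) =====
-- stated objective: faster
-- what changed: Instead of computing factorial(i)//divisor from scratch for every entry, B builds the table back-to-front from 1 with a single running product (one multiplication per entry, no factorials, no big-integer divisions); intended as faster (a timing run measured ~20-70x at the sizes where A finished, but could not confirm it at the largest sizes, where both time out on the huge outputs).
import Mathlib
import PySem

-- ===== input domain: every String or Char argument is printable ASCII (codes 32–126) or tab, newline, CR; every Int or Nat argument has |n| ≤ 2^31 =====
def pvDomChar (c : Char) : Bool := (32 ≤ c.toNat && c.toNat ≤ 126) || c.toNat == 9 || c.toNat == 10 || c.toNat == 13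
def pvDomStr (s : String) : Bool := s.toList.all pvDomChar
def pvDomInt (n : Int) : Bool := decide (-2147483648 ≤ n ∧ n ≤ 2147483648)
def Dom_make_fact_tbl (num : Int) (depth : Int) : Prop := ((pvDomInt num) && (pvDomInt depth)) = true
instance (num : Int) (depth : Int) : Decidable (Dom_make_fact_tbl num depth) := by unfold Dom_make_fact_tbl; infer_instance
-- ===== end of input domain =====

-- B replaces per-entry factorial computations and big divisions by a single running
-- product built back-to-front (one multiplication per entry); intended as faster
-- (a timing run measured ~20-70x at the sizes where A finished but could not
-- confirm it at the largest sizes, where both time out on the huge outputs).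

-- ===== PORT A =====
-- math.factorial; exact for n ≥ 0 (Python raises ValueError for n < 0, excluded by Pre_)
def pyFact (n : Int) : Int := (Nat.factorial n.toNat : Int)

def make_fact_tbl (num : Int) (depth : Int) : List Int :=
  -- divisor = factorial(num - depth), computed once before the loop
  (((List.range depth.toNat).foldl
      (fun (st : List Int × Int) _ =>
        (st.1 ++ [PySem.Int.floordiv (pyFact st.2) (pyFact (num - depth))], st.2 - 1))
      ([], num - 1))).1

-- ===== PORT B =====
def make_fact_tbl_alt (num : Int) (depth : Int) : List Int :=
  (((List.range depth.toNat).foldl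
      (fun (st : List Int × Int × Int) _ =>
        (st.1 ++ [st.2.1], st.2.1 * (st.2.2 + 1), st.2.2 + 1))
      ([], 1, num - depth))).1.reverse

-- ===== PRECONDITION & SPEC =====
-- Pre_ excludes exactly the inputs where Python's factorial(num - depth) raises ValueError.
def Pre_make_fact_tbl (num : Int) (depth : Int) : Prop := depth ≤ num
instance (num : Int) (depth : Int) : Decidable (Pre_make_fact_tbl num depth) := by unfold Pre_make_fact_tbl; infer_instance
def pvWitness_make_fact_tbl : Int × Int := (7, 3)

def Spec_make_fact_tbl (num : Int) (depth : Int) (out : List Int) : Prop := out = make_fact_tbl_alt num depth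
instance (num : Int) (depth : Int) (out : List Int) : Decidable (Spec_make_fact_tbl num depth out) := by unfold Spec_make_fact_tbl; infer_instance

-- ===== CLAIM =====
def Claim_equal_make_fact_tbl : Prop := ∀ (num : Int) (depth : Int), Dom_make_fact_tbl num depth → Pre_make_fact_tbl num depth → Spec_make_fact_tbl num depth (make_fact_tbl num depth)

-- ===== LEMMAS AND PROOFS =====

-- ascending product (b+1)(b+2)⋯(b+k) over Int, used only in the proofs
def ascPI (b : Int) : Nat → Int
  | 0 => 1
  | k + 1 => ascPI b k * (b + k + 1)

lemma ascPI_natCast (b j : Nat) : ascPI (b : Int) j = ((b + 1).ascFactorial j : Int) := by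
  induction j with
  | zero => simp [ascPI, Nat.ascFactorial_zero]
  | succ k ih =>
      simp [ascPI, ih, Nat.ascFactorial_succ]
      ring

lemma foldlA_char (divisor : Int) (n : Nat) (l : List Int) (i : Int) :
    ((List.range n).foldl
      (fun (st : List Int × Int) _ =>
        (st.1 ++ [PySem.Int.floordiv (pyFact st.2) divisor], st.2 - 1))
      (l, i)) =
    (l ++ (List.range n).map (fun k : Nat => PySem.Int.floordiv (pyFact (i - (k : Int))) divisor), i - (n : Int)) := by
  induction n generalizing l i with
  | zero => simp
  | succ m ih =>
      rw [List.range_succ, List.foldl_append, ih]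
      simp
      omega

lemma foldlB_char (n : Nat) (l : List Int) (a j : Int) :
    ((List.range n).foldl
      (fun (st : List Int × Int × Int) _ =>
        (st.1 ++ [st.2.1], st.2.1 * (st.2.2 + 1), st.2.2 + 1))
      (l, a, j)) =
    (l ++ (List.range n).map (fun k => a * ascPI j k), a * ascPI j n, j + n) := by
  induction n generalizing l a j with
  | zero => simp [ascPI]
  | succ m ih =>
      rw [List.range_succ, List.foldl_append, ih]
      simp [ascPI]
      refine ⟨by ring, by omega⟩

lemma map_range_reverse {α : Type} (f : Nat → α) (d : Nat) :
    ((List.range d).map f).reverse = (List.range d).map (fun k => f (d - 1 - k)) := by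
  apply List.ext_getElem
  · simp
  · intro i h1 h2
    simp only [List.length_reverse, List.length_map, List.length_range] at h1
    rw [List.getElem_reverse]
    simp only [List.getElem_map, List.getElem_range]
    congr 1
    simp

lemma fact_div_fact (b j : Nat) :
    PySem.Int.floordiv (pyFact ((b : Int) + j)) (pyFact (b : Int)) = ascPI (b : Int) j := by
  have h1 : ((b : Int) + j).toNat = b + j := by omega
  have h2 : ((b : Int)).toNat = b := by omega
  rw [pyFact, pyFact, h1, h2, PySem.Int.floordiv_natCast, ascPI_natCast]
  congr 1
  rw [← Nat.factorial_mul_ascFactorial b j, Nat.mul_div_cancel_left _ (Nat.factorial_pos b)]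

-- ===== VERDICT =====
theorem make_fact_tbl_spec : Claim_equal_make_fact_tbl := by
  intro num depth _ hpre
  unfold Pre_make_fact_tbl at hpre
  unfold Spec_make_fact_tbl make_fact_tbl make_fact_tbl_alt
  rw [foldlA_char, foldlB_char]
  simp only [List.nil_append]
  rw [map_range_reverse]
  apply List.map_congr_left
  intro k hk
  simp only [List.mem_range] at hk
  set d := depth.toNat with hd
  obtain ⟨b, hbe⟩ : ∃ b : Nat, num - depth = (b : Int) := ⟨(num - depth).toNat, by omega⟩
  have h1 : num - 1 - (k : Int) = (b : Int) + ((d - 1 - k : Nat) : Int) := by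
    omega
  rw [hbe, h1, fact_div_fact]
  exact (one_mul _).symm
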